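-- pv_equiv track=rewrite | github.com/sky-2002/chatbot | BankingDemo/actions/actions.py | corrected
-- ===== SOURCE A (Python) =====
-- def corrected(answer):
--   corrected_answer = ''
--
--   for word in answer.split():
--
--       #If it's a subword token
--       if word[0:2] == '##':
--           corrected_answer += word[2:]
--       else:
--           corrected_answer += ' ' + word
--   return corrected_answer
-- ===== SOURCE B (Python) =====
-- def corrected(answer):
--     words = answer.split()
--     if not words:
--         return ''
--     return (' ' + ' '.join(words)).replace(' ##', '')
-- ===== Notes on version B (the rewrite author's own statement) =====
-- stated objective: idiomatic
-- what changed: Replaces the per-token loop with per-token branching by pure string operations: split the answer, join the words with a leading space, then one replace call that deletes every space-plus-hash-hash subword boundary at once.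
import Mathlib
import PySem

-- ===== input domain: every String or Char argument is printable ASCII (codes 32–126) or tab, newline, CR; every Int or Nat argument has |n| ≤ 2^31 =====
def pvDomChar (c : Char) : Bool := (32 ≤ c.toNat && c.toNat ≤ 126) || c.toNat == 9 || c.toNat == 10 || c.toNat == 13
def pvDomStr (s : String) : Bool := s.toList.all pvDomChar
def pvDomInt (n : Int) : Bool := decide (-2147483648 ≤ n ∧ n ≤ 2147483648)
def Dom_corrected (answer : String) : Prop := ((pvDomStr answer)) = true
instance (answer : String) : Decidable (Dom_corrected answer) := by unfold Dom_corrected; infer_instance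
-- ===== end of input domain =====

-- B rebuilds the text by pure string operations (split / join with a leading space / one replace of ' ##')
-- instead of A's per-token loop with an if/else branch; same return value, no side effects in either.

-- ===== PORT A =====
-- loop over answer.split(), appending word[2:] for '##'-tokens and ' ' + word otherwise
def corrected (answer : String) : String :=
  String.ofList
    ((PySem.Chars.split₀ answer.toList).foldl
      (fun acc word =>
        if PySem.List.slice word (some 0) (some 2) = ['#', '#'] then
          acc ++ PySem.List.slice word (some 2) none
        else
          acc ++ ([' '] ++ word))
      [])

-- ===== PORT B =====
-- words = answer.split(); '' if empty, else (' ' + ' '.join(words)).replace(' ##', '')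
def corrected_alt (answer : String) : String :=
  let words := PySem.Chars.split₀ answer.toList
  if words = [] then ""
  else
    String.ofList
      (PySem.Chars.replace ([' '] ++ PySem.Chars.join [' '] words) [' ', '#', '#'] [])

-- ===== PRECONDITION & SPEC =====
def Spec_corrected (answer : String) (out : String) : Prop := out = corrected_alt answer
instance (answer : String) (out : String) : Decidable (Spec_corrected answer out) := by unfold Spec_corrected; infer_instance

-- ===== CLAIM (what is proved, stated in full; the proofs are below) =====
def Claim_equal_corrected : Prop := ∀ (answer : String), Dom_corrected answer → Spec_corrected answer (corrected answer)

-- ===== LEMMAS AND PROOFS =====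

-- structural characterization of PySem.Chars.replace with pattern " ##" and empty replacement
def repl : List Char → List Char
  | [] => []
  | c :: t =>
    if [' ', '#', '#'].isPrefixOf (c :: t) then repl (t.drop 2) else c :: repl t
termination_by l => l.length
decreasing_by
  · simp only [List.length_cons, List.length_drop]; omega
  · simp

theorem repl_go (fuel : Nat) : ∀ (l acc : List Char), l.length ≤ fuel →
    PySem.Chars.replace.go [' ', '#', '#'] [] fuel l acc = acc.reverse ++ repl l := by
  induction fuel with
  | zero =>
    intro l acc h
    have hl : l = [] := by
      cases l with
      | nil => rfl
      | cons c t => simp at h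
    subst hl
    simp [PySem.Chars.replace.go, repl]
  | succ fuel ih =>
    intro l acc h
    cases l with
    | nil => simp [PySem.Chars.replace.go, repl]
    | cons c t =>
      rw [PySem.Chars.replace.go]
      by_cases hp : [' ', '#', '#'].isPrefixOf (c :: t) = true
      · rw [if_pos hp]
        have hlen : (List.drop 3 (c :: t)).length ≤ fuel := by
          simp at h ⊢; omega
        simp only [List.length_cons, List.length_nil, List.reverse_nil, List.nil_append]
        rw [ih _ _ hlen]
        rw [repl]
        rw [if_pos hp]
        simp
      · rw [if_neg hp]
        have hlen : t.length ≤ fuel := by simp at h; omega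
        rw [ih _ _ hlen]
        rw [repl]
        rw [if_neg hp]
        simp

theorem replace_eq_repl (s : List Char) :
    PySem.Chars.replace s [' ', '#', '#'] [] = repl s := by
  rw [PySem.Chars.replace]
  simp
  exact repl_go s.length s [] le_rfl

theorem repl_skip : ∀ (w t : List Char), (∀ c ∈ w, c ≠ ' ') →
    repl (w ++ t) = w ++ repl t := by
  intro w
  induction w with
  | nil => intro t _; rfl
  | cons c w' ih =>
    intro t hw
    have hc : c ≠ ' ' := hw c (by simp)
    rw [List.cons_append, repl]
    have hp : [' ', '#', '#'].isPrefixOf (c :: (w' ++ t)) = false := by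
      simp [List.isPrefixOf]
      intro h; exact absurd h.symm hc
    rw [hp]
    simp only [if_false, Bool.false_eq_true]
    simp [ih t (fun c hc' => hw c (by simp [hc']))]

-- the list of tokens rendered as ' ' + token each, concatenated
def flatTok (ws : List (List Char)) : List Char :=
  (ws.map (fun w => ' ' :: w)).flatten

-- per-token contribution on A's side
def tok (w : List Char) : List Char :=
  if w.take 2 = ['#', '#'] then w.drop 2 else ' ' :: w

theorem repl_flatTok : ∀ (ws : List (List Char)),
    (∀ w ∈ ws, w ≠ [] ∧ ∀ c ∈ w, ¬ PySem.Chars.isspace c) →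
    repl (flatTok ws) = ws.flatMap tok := by
  intro ws
  induction ws with
  | nil => intro _; simp [flatTok, repl]
  | cons w rest ih =>
    intro hws
    obtain ⟨hne, hsp⟩ := hws w (by simp)
    have hrest : ∀ w ∈ rest, w ≠ [] ∧ ∀ c ∈ w, ¬ PySem.Chars.isspace c := by
      intro v hv; exact hws v (by simp [hv])
    have hnos : ∀ c ∈ w, c ≠ ' ' := by
      intro c hc heq
      exact hsp c hc (by simp [heq, PySem.Chars.isspace])
    have hflat : flatTok (w :: rest) = ' ' :: (w ++ flatTok rest) := by
      simp [flatTok]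
    rw [hflat]
    by_cases hww : w.take 2 = ['#', '#']
    · -- w = '#' :: '#' :: w1
      obtain ⟨w1, hw1⟩ : ∃ w1, w = '#' :: '#' :: w1 := by
        cases w with
        | nil => simp at hww
        | cons a t =>
          cases t with
          | nil => simp at hww
          | cons b t' =>
            simp [List.take] at hww
            exact ⟨t', by simp [hww.1, hww.2]⟩
      subst hw1
      rw [repl]
      have hp : [' ', '#', '#'].isPrefixOf (' ' :: ('#' :: '#' :: w1 ++ flatTok rest)) = true := by
        simp [List.isPrefixOf]
      rw [if_pos hp]
      simp only [List.cons_append, List.drop_succ_cons, List.drop_zero]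
      rw [repl_skip w1 (flatTok rest) (fun c hc => hnos c (by simp [hc]))]
      rw [ih hrest]
      simp [tok, hww]
    · rw [repl]
      have hp : [' ', '#', '#'].isPrefixOf (' ' :: (w ++ flatTok rest)) = false := by
        cases w with
        | nil => exact absurd rfl hne
        | cons a t =>
          cases t with
          | nil =>
            -- w = [a]; next char (if any) is the ' ' opening the next token
            cases hr : rest with
            | nil => simp [flatTok, List.isPrefixOf]
            | cons v vs =>
              simp [flatTok, List.isPrefixOf]
          | cons b t' =>
            simp [List.isPrefixOf]
            intro h1 h2
            exact absurd (by simp [List.take, ← h1, ← h2]) hww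
      rw [hp]
      simp only [if_false, Bool.false_eq_true]
      rw [repl_skip w (flatTok rest) hnos]
      rw [ih hrest]
      simp [tok, hww]

theorem split₀_go_ok : ∀ (s cur : List Char) (acc : List (List Char)),
    (∀ c ∈ cur, ¬ PySem.Chars.isspace c) →
    (∀ w ∈ acc, w ≠ [] ∧ ∀ c ∈ w, ¬ PySem.Chars.isspace c) →
    ∀ w ∈ PySem.Chars.split₀.go s cur acc, w ≠ [] ∧ ∀ c ∈ w, ¬ PySem.Chars.isspace c := by
  intro s
  induction s with
  | nil =>
    intro cur acc hcur hacc w hw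
    rw [PySem.Chars.split₀.go] at hw
    by_cases hc : cur.isEmpty = true
    · rw [if_pos hc] at hw
      exact hacc w (by simpa using hw)
    · rw [if_neg hc] at hw
      simp at hw
      rcases hw with hw | hw
      · exact hacc w hw
      · subst hw
        constructor
        · simp; intro h; subst h; simp at hc
        · intro c hc'; exact hcur c (by simpa using hc')
  | cons c rest ih =>
    intro cur acc hcur hacc w hw
    rw [PySem.Chars.split₀.go] at hw
    by_cases hsp : PySem.Chars.isspace c = true
    · rw [if_pos hsp] at hw
      by_cases hc : cur.isEmpty = true
      · rw [if_pos hc] at hw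
        exact ih [] acc (by simp) hacc w hw
      · rw [if_neg hc] at hw
        refine ih [] (cur.reverse :: acc) (by simp) ?_ w hw
        intro v hv
        simp at hv
        rcases hv with hv | hv
        · subst hv
          constructor
          · simp; intro h; subst h; simp at hc
          · intro d hd; exact hcur d (by simpa using hd)
        · exact hacc v hv
    · rw [if_neg hsp] at hw
      refine ih (c :: cur) acc ?_ hacc w hw
      intro d hd
      simp at hd
      rcases hd with hd | hd
      · subst hd; exact hsp
      · exact hcur d hd

theorem split₀_ok (s : List Char) :
    ∀ w ∈ PySem.Chars.split₀ s, w ≠ [] ∧ ∀ c ∈ w, ¬ PySem.Chars.isspace c := by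
  rw [PySem.Chars.split₀]
  exact split₀_go_ok s [] [] (by simp) (by simp)

theorem join_flatTok : ∀ (w : List Char) (ws : List (List Char)),
    ' ' :: PySem.Chars.join [' '] (w :: ws) = flatTok (w :: ws) := by
  intro w ws
  induction ws generalizing w with
  | nil => simp [PySem.Chars.join_singleton, flatTok]
  | cons v vs ih =>
    rw [PySem.Chars.join_cons_cons]
    have := ih v
    simp [flatTok] at this ⊢
    simp [← this]

theorem foldl_tok (ws : List (List Char)) :
    ws.foldl
      (fun acc word =>
        if PySem.List.slice word (some 0) (some 2) = ['#', '#'] then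
          acc ++ PySem.List.slice word (some 2) none
        else
          acc ++ ([' '] ++ word))
      [] = ws.flatMap tok := by
  have hfun : (fun (acc : List Char) word =>
      if PySem.List.slice word (some 0) (some 2) = ['#', '#'] then
        acc ++ PySem.List.slice word (some 2) none
      else
        acc ++ ([' '] ++ word)) = fun acc word => acc ++ tok word := by
    funext acc word
    rw [PySem.List.slice_toNat word (by norm_num) (by norm_num),
        PySem.List.slice_from word (by norm_num)]
    have h2 : (2 : Int).toNat = 2 := rfl
    simp only [h2, Int.toNat_zero, List.drop_zero, Nat.sub_zero, tok]
    split <;> simp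
  rw [hfun, PySem.List.foldl_append_eq_flatMap]
  simp

-- ===== VERDICT (by name: the statement is the Claim_ definition above) =====
theorem corrected_spec : Claim_equal_corrected := by
  intro answer _
  unfold Spec_corrected corrected corrected_alt
  cases hws : PySem.Chars.split₀ answer.toList with
  | nil => simp
  | cons w rest =>
    simp only [if_neg (by simp : w :: rest ≠ [])]
    rw [foldl_tok]
    have : [' '] ++ PySem.Chars.join [' '] (w :: rest) = flatTok (w :: rest) := by
      simpa using join_flatTok w rest
    rw [this, replace_eq_repl, repl_flatTok (w :: rest) (hws ▸ split₀_ok answer.toList)]
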